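-- pv_equiv track=rewrite | github.com/SimpLord-github/HEVC | bitstream/cabac.py | _exp_golomb_k0
-- ===== SOURCE A (Python) =====
-- import math
--
-- def _exp_golomb_k0(val: int) -> list[int]:
--     """
--     Exponential-Golomb order-0 (EG0) binarisation.
--     HEVC: m leading 0s + 1 + m-bit suffix.
--         val=0 → [1]
--         val=1 → [0, 1, 0]
--         val=2 → [0, 1, 1]
--         val=3 → [0, 0, 1, 0, 0]
--     """
--     if val == 0:
--         return [1]
--     m = int(math.floor(math.log2(val + 1)))
--     prefix = [0] * m + [1]                                    # m zeros then 1
--     suffix_val = val + 1 - (1 << m)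
--     suffix = [(suffix_val >> (m - 1 - i)) & 1 for i in range(m)]
--     return prefix + suffix
-- ===== SOURCE B (Python) =====
-- def _bits(x):
--     # binary expansion of x (for x >= 1), MSB first, built recursively
--     if x > 1:
--         return _bits(x >> 1) + [x & 1]
--     return [1]
--
-- def _exp_golomb_k0(val: int) -> list[int]:
--     b = _bits(val + 1)
--     return [0] * (len(b) - 1) + b
-- ===== Notes on version B (the rewrite author's own statement) =====
-- stated objective: simpler
-- what changed: B drops the log2-based prefix-length computation, the special case for a zero input and the separate prefix/suffix assembly, instead building the MSB-first binary expansion of the successor of val recursively and prepending len-minus-one zeros.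
import Mathlib
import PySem

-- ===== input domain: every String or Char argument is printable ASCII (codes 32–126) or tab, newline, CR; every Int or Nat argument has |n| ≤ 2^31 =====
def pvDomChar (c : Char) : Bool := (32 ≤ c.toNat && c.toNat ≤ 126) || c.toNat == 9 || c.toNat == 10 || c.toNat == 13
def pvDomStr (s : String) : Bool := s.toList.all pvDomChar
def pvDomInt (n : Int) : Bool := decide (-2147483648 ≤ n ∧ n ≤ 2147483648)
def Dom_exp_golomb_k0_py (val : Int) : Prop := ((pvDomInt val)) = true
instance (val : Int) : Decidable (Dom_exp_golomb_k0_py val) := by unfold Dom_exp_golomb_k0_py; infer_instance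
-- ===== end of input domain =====

-- B replaces A's log2-based prefix/suffix assembly by one recursive binary expansion of val+1
-- with len-1 zeros prepended; same cost, simpler decomposition.

-- ===== PORT A =====
-- int(math.floor(math.log2(val + 1))): on the nonnegative part of the domain the double-precision
-- log2 floor equals Nat.log2 of (val+1) exactly; on negative inputs A raises ValueError (excluded by Pre_).
def exp_golomb_k0_py (val : Int) : List Int :=
  if val = 0 then [1]
  else
    let m : Nat := Nat.log2 (val + 1).toNat
    let pref : List Int := List.replicate m 0 ++ [1]
    let suffix_val : Int := val + 1 - 2 ^ m
    -- (suffix_val >> (m-1-i)) & 1 : Python '>>' is floor division by 2^k, '& 1' is band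
    let suffix : List Int :=
      (List.range m).map (fun i => PySem.Int.band (PySem.Int.floordiv suffix_val (2 ^ (m - 1 - i))) 1)
    pref ++ suffix

-- ===== PORT B =====
-- _bits(x): MSB-first binary expansion for x ≥ 1 ('x >> 1' = floordiv x 2, 'x & 1' = band x 1)
def pyBits (x : Int) : List Int :=
  if 1 < x then pyBits (PySem.Int.floordiv x 2) ++ [PySem.Int.band x 1]
  else [1]
termination_by x.toNat
decreasing_by
  rename_i h
  rw [PySem.Int.floordiv_eq_ediv_of_pos (by omega : (0:Int) < 2)]
  omega

def exp_golomb_k0_py_alt (val : Int) : List Int :=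
  let b := pyBits (val + 1)
  List.replicate (b.length - 1) 0 ++ b

-- ===== PRECONDITION & SPEC =====
-- Pre_ excludes exactly the negative inputs, on which A raises ValueError (math.log2 domain error).
def Pre_exp_golomb_k0_py (val : Int) : Prop := 0 ≤ val
instance (val : Int) : Decidable (Pre_exp_golomb_k0_py val) := by unfold Pre_exp_golomb_k0_py; infer_instance
def pvWitness_exp_golomb_k0_py : Int := 3

def Spec_exp_golomb_k0_py (val : Int) (out : List Int) : Prop := out = exp_golomb_k0_py_alt val
instance (val : Int) (out : List Int) : Decidable (Spec_exp_golomb_k0_py val out) := by unfold Spec_exp_golomb_k0_py; infer_instance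

-- ===== CLAIM (what is proved, stated in full; the proofs are below) =====
def Claim_equal_exp_golomb_k0_py : Prop := ∀ (val : Int), Dom_exp_golomb_k0_py val → Pre_exp_golomb_k0_py val → Spec_exp_golomb_k0_py val (exp_golomb_k0_py val)

-- ===== LEMMAS AND PROOFS =====

-- pyBits on a positive Nat cast is the MSB-first binary expansion, written as a map over indices.
theorem pyBits_natCast (n : Nat) (h : 1 ≤ n) :
    pyBits (n : Int) =
      (List.range (Nat.log2 n + 1)).map (fun i => ((n / 2 ^ (Nat.log2 n - i) % 2 : Nat) : Int)) := by
  induction n using Nat.strong_induction_on with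
  | _ n ih =>
    rw [pyBits]
    by_cases h2 : 2 ≤ n
    · have hlt : (1 : Int) < (n : Int) := by exact_mod_cast h2
      rw [if_pos hlt]
      have hdiv : PySem.Int.floordiv (n : Int) 2 = ((n / 2 : Nat) : Int) := by
        exact_mod_cast PySem.Int.floordiv_natCast n 2
      have hband : PySem.Int.band (n : Int) 1 = ((n % 2 : Nat) : Int) := by
        have := PySem.Int.band_natCast n 1
        rw [Nat.and_one_is_mod] at this
        exact_mod_cast this
      have hq1 : 1 ≤ n / 2 := by omega
      have hqlt : n / 2 < n := by omega
      rw [hdiv, hband, ih (n / 2) hqlt hq1]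
      have h1log : 1 ≤ Nat.log2 n := (Nat.le_log2 (by omega)).mpr (by simp only [pow_one]; exact h2)
      have hlog2 : Nat.log2 (n / 2) = Nat.log2 n - 1 := by
        simpa [Nat.log2_eq_log_two] using Nat.log_div_base 2 n
      have hlog : Nat.log2 n = Nat.log2 (n / 2) + 1 := by omega
      rw [hlog]
      conv_rhs => rw [List.range_succ, List.map_append]
      congr 1
      · apply List.map_congr_left
        intro i hi
        have hi' : i ≤ Nat.log2 (n / 2) := by
          have := List.mem_range.mp hi; omega
        have hsub : Nat.log2 (n / 2) + 1 - i = (Nat.log2 (n / 2) - i) + 1 := by omega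
        rw [hsub, pow_succ, mul_comm (2 ^ (Nat.log2 (n / 2) - i)) 2, ← Nat.div_div_eq_div_mul]
      · simp
    · have hn1 : n = 1 := by omega
      subst hn1
      have hif : ¬ ((1 : Int) < ((1 : Nat) : Int)) := by norm_num
      rw [if_neg hif]
      have hl : Nat.log2 1 = 0 := by simp [Nat.log2_eq_log_two]
      simp [hl]

-- ===== VERDICT (by name: the statement is the Claim_ definition above) =====
theorem exp_golomb_k0_py_spec : Claim_equal_exp_golomb_k0_py := by
  intro val _ hpre
  have hval : (0 : Int) ≤ val := hpre
  unfold Spec_exp_golomb_k0_py exp_golomb_k0_py exp_golomb_k0_py_alt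
  by_cases h0 : val = 0
  · subst h0
    rw [if_pos rfl]
    have h1 : ((0 : Int) + 1) = ((1 : Nat) : Int) := by norm_num
    rw [h1, pyBits_natCast 1 le_rfl]
    have hl : Nat.log2 1 = 0 := by simp [Nat.log2_eq_log_two]
    simp [hl]
  · rw [if_neg h0]
    set n : Nat := (val + 1).toNat with hn
    have hcast : val + 1 = (n : Int) := by omega
    have hn2 : 2 ≤ n := by omega
    rw [hcast]
    set m : Nat := Nat.log2 n with hm
    have hm1 : 1 ≤ m := (Nat.le_log2 (by omega)).mpr (by simpa using hn2)
    have hpow_le : 2 ^ m ≤ n := Nat.log2_self_le (by omega)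
    have hlt : n < 2 ^ (m + 1) := Nat.lt_log2_self
    rw [pyBits_natCast n (by omega), ← hm]
    set r : Nat := n - 2 ^ m with hr
    have hnr : n = 2 ^ m + r := by omega
    have hsuf : (n : Int) - 2 ^ m = ((r : Nat) : Int) := by rw [hnr]; push_cast; ring
    simp only [hsuf]
    simp only [List.length_map, List.length_range, Nat.add_sub_cancel]
    rw [List.range_succ_eq_map]
    simp only [List.map_cons, List.map_map]
    have hf0 : ((n / 2 ^ (m - 0) % 2 : Nat) : Int) = 1 := by
      have hdiv1 : n / 2 ^ m = 1 := by
        apply Nat.div_eq_of_lt_le (by simpa using hpow_le)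
        calc n < 2 ^ (m + 1) := hlt
          _ = (1 + 1) * 2 ^ m := by ring
      simp [hdiv1]
    rw [List.append_assoc]
    congr 1
    rw [List.singleton_append, hf0]
    congr 1
    apply List.map_congr_left
    intro i hi
    have him : i < m := List.mem_range.mp hi
    simp only [Function.comp_apply]
    have hband : PySem.Int.band ((r / 2 ^ (m - 1 - i) : Nat) : Int) 1
        = ((r / 2 ^ (m - 1 - i) % 2 : Nat) : Int) := by
      have := PySem.Int.band_natCast (r / 2 ^ (m - 1 - i)) 1
      rw [Nat.and_one_is_mod] at this
      exact_mod_cast this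
    have hpowcast : ((2 : Int) ^ (m - 1 - i)) = ((2 ^ (m - 1 - i) : Nat) : Int) := by
      push_cast; ring
    rw [hpowcast, PySem.Int.floordiv_natCast r _, hband]
    have hidx : m - Nat.succ i = m - 1 - i := by omega
    rw [hidx]
    set k : Nat := m - 1 - i with hk
    have hkm : k < m := by omega
    have hdec : n / 2 ^ k = 2 ^ (m - k) + r / 2 ^ k := by
      conv_lhs => rw [hnr]
      have hsplit : 2 ^ m = 2 ^ k * 2 ^ (m - k) := by
        rw [← pow_add]; congr 1; omega
      rw [hsplit, Nat.mul_add_div (Nat.two_pow_pos k)]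
    rw [hdec]
    have hmk : m - k = (m - k - 1) + 1 := by omega
    rw [hmk, pow_succ, mul_comm (2 ^ (m - k - 1)) 2, Nat.mul_add_mod]
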